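-- pv_equiv track=rewrite | github.com/flex-team/flex-oncall | brain/scripts/domain_router.py | determine_primary_related
-- ===== SOURCE A (Python) =====
-- def determine_primary_related(
--     scores: dict[str, int],
--     breakdowns: dict[str, dict],
--     data: dict,
-- ) -> tuple[list[str], list[str]]:
--     """Primary: highest score. Tiebreak: d:kw hits > g:q+g:a hits > both primary.
--     Related: primary's d:x + domains referencing primary via d:x (bidirectional)."""
--     if not scores:
--         return [], []
--
--     max_score = max(scores.values())
--     candidates = [d for d, s in scores.items() if s == max_score]
--
--     if len(candidates) == 1:
--         primary_list = candidates
--     else: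
--         # Tiebreak 1: d:kw hits
--         def kw_hits(d: str) -> int:
--             return breakdowns.get(d, {}).get("d:kw", 0)
--
--         max_kw = max(kw_hits(d) for d in candidates)
--         kw_winners = [d for d in candidates if kw_hits(d) == max_kw]
--
--         if len(kw_winners) == 1:
--             primary_list = kw_winners
--         else:
--             # Tiebreak 2: g:q + g:a hits
--             def gqa_hits(d: str) -> int:
--                 bd = breakdowns.get(d, {})
--                 return bd.get("g:q", 0) + bd.get("g:a", 0)
--
--             max_gqa = max(gqa_hits(d) for d in kw_winners)
--             gqa_winners = [d for d in kw_winners if gqa_hits(d) == max_gqa]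
--             primary_list = gqa_winners  # all remaining are primary
--
--     # Related: bidirectional d:x
--     related: set[str] = set()
--     primary_set = set(primary_list)
--
--     for primary_id in primary_list:
--         domain = data["domains"].get(primary_id, {})
--         for ref in domain.get("cross_domains", []):
--             if ref not in primary_set:
--                 related.add(ref)
--
--     # Domains that reference any primary via d:x
--     for domain_id, domain in data["domains"].items():
--         if domain_id in primary_set:
--             continue
--         for ref in domain.get("cross_domains", []):
--             if ref in primary_set:
--                 related.add(domain_id)
--                 break
--
--     return primary_list, sorted(related)
-- ===== SOURCE B (Python) =====
-- def determine_primary_related(scores, breakdowns, data):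
--     if not scores:
--         return [], []
--
--     def key(item):
--         d, s = item
--         bd = breakdowns.get(d, {})
--         return (s, bd.get("d:kw", 0), bd.get("g:q", 0) + bd.get("g:a", 0))
--
--     best = max(key(item) for item in scores.items())
--     primary_list = [d for d, s in scores.items() if key((d, s)) == best]
--
--     primary_set = set(primary_list)
--     domains = data["domains"]
--     outgoing = [ref for p in primary_list
--                 for ref in domains.get(p, {}).get("cross_domains", [])
--                 if ref not in primary_set]
--     incoming = [d for d, dom in domains.items()
--                 if d not in primary_set
--                 and any(ref in primary_set for ref in dom.get("cross_domains", []))]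
--     return primary_list, sorted(set(outgoing + incoming))
-- ===== Notes on version B (the rewrite author's own statement) =====
-- stated objective: simpler
-- what changed: Replaces the three staged max-then-filter tiebreak passes with one lexicographic key (score, d:kw, g:q+g:a) maximized and filtered in a single pass, and replaces the nested related-set loops with two comprehensions whose union is sorted.
-- outside the precondition, e.g. on determine_primary_related({'a': 1}, {}, {}): A raises KeyError, B raises KeyError
import Mathlib
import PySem

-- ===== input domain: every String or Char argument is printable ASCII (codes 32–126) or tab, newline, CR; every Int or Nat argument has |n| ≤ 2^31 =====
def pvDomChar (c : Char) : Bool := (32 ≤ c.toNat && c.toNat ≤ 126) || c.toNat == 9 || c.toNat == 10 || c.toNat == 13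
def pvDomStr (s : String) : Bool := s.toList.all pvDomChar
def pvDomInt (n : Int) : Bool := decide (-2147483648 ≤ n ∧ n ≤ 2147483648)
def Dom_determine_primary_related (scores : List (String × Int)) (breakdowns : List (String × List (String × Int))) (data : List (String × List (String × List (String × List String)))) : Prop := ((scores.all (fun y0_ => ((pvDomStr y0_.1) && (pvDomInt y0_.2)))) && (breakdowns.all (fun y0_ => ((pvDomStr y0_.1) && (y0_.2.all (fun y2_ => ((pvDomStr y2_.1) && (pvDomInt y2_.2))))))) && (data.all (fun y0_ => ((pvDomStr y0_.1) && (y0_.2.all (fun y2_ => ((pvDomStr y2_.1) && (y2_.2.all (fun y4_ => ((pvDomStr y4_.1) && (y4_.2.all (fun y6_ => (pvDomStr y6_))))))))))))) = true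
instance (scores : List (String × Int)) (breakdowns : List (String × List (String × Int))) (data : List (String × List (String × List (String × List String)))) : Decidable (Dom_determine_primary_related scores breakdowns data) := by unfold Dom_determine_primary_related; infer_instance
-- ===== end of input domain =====

-- ===== PORT A =====
-- B replaces A's three staged tiebreak passes with one lexicographic key and the nested
-- related-set loops with two comprehensions; objective: simpler. Equivalence is about the
-- return value (neither function mutates its arguments).
def drKwHits (breakdowns : List (String × List (String × Int))) (d : String) : Int :=
  (PySem.Dict.mk ((PySem.Dict.mk breakdowns).getD d [])).getD "d:kw" 0

def drGqaHits (breakdowns : List (String × List (String × Int))) (d : String) : Int :=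
  let bd := PySem.Dict.mk ((PySem.Dict.mk breakdowns).getD d [])
  bd.getD "g:q" 0 + bd.getD "g:a" 0

-- data["domains"].get(d, {}).get("cross_domains", [])
def drRefs (domains : List (String × List (String × List String))) (d : String) : List String :=
  (PySem.Dict.mk ((PySem.Dict.mk domains).getD d [])).getD "cross_domains" []

-- A's staged primary selection (called only on nonempty scores; the `.getD 0` on max? is the
-- total form of Python's max over a list that is nonempty at every call site)
def drPrimaryA (breakdowns : List (String × List (String × Int))) (scores : List (String × Int)) : List String :=
  let max_score := (PySem.List.max? (scores.map Prod.snd) (fun x => x)).getD 0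
  let candidates := (scores.filter (fun p => p.2 == max_score)).map Prod.fst
  if candidates.length == 1 then candidates
  else
    let max_kw := (PySem.List.max? (candidates.map (drKwHits breakdowns)) (fun x => x)).getD 0
    let kw_winners := candidates.filter (fun d => drKwHits breakdowns d == max_kw)
    if kw_winners.length == 1 then kw_winners
    else
      let max_gqa := (PySem.List.max? (kw_winners.map (drGqaHits breakdowns)) (fun x => x)).getD 0
      kw_winners.filter (fun d => drGqaHits breakdowns d == max_gqa)

-- A's related-set loops ('break' on the first matching ref ported as List.any — exact)
def drRelatedA (primary_list : List String) (domains : List (String × List (String × List String))) : List String :=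
  let primary_set : PySem.Set String := PySem.Set.ofList primary_list
  let related1 := primary_list.foldl (fun s pid =>
      (drRefs domains pid).foldl
        (fun s r => if PySem.Set.contains primary_set r then s else PySem.Set.add s r) s)
    (PySem.Set.empty : PySem.Set String)
  let related2 := domains.foldl (fun s q =>
      if PySem.Set.contains primary_set q.1 then s
      else if ((PySem.Dict.mk q.2).getD "cross_domains" []).any (fun r => PySem.Set.contains primary_set r)
        then PySem.Set.add s q.1 else s)
    related1
  PySem.List.sorted related2 (fun x => x) false

-- data["domains"] raises KeyError when the key is missing; Pre_ excludes that, `.getD _ []` is the total form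
def determine_primary_related (scores : List (String × Int)) (breakdowns : List (String × List (String × Int))) (data : List (String × List (String × List (String × List String)))) : List String × List String :=
  match scores with
  | [] => ([], [])
  | _ :: _ =>
    let primary_list := drPrimaryA breakdowns scores
    (primary_list, drRelatedA primary_list ((PySem.Dict.mk data).getD "domains" []))

-- ===== PORT B =====
-- key(item) = (score, d:kw hits, g:q+g:a hits)
def drKey (breakdowns : List (String × List (String × Int))) (p : String × Int) : Int × Int × Int :=
  let bd := PySem.Dict.mk ((PySem.Dict.mk breakdowns).getD p.1 [])
  (p.2, bd.getD "d:kw" 0, bd.getD "g:q" 0 + bd.getD "g:a" 0)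

-- hand port of Python's '<' on int triples (lexicographic) — exact
def drLexLt (a b : Int × Int × Int) : Bool :=
  a.1 < b.1 || (a.1 == b.1 && (a.2.1 < b.2.1 || (a.2.1 == b.2.1 && a.2.2 < b.2.2)))

-- best = max(key(item) for item in scores.items()); primary = all items attaining it, in order
def drPrimaryB (breakdowns : List (String × List (String × Int))) (scores : List (String × Int)) : List String :=
  match scores with
  | [] => []
  | p0 :: rest =>
    let best := rest.foldl
      (fun b q => if drLexLt b (drKey breakdowns q) then drKey breakdowns q else b)
      (drKey breakdowns p0)
    ((p0 :: rest).filter (fun p => drKey breakdowns p == best)).map Prod.fst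

-- related = sorted(set(outgoing + incoming))
def drRelatedB (primary_list : List String) (domains : List (String × List (String × List String))) : List String :=
  let primary_set : PySem.Set String := PySem.Set.ofList primary_list
  let outgoing := primary_list.flatMap (fun p =>
      (drRefs domains p).filter (fun r => !(PySem.Set.contains primary_set r)))
  let incoming := (domains.filter (fun q =>
      !(PySem.Set.contains primary_set q.1) &&
      ((PySem.Dict.mk q.2).getD "cross_domains" []).any (fun r => PySem.Set.contains primary_set r))).map Prod.fst
  PySem.List.sorted (PySem.Set.ofList (outgoing ++ incoming)) (fun x => x) false

def determine_primary_related_alt (scores : List (String × Int)) (breakdowns : List (String × List (String × Int))) (data : List (String × List (String × List (String × List String)))) : List String × List String :=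
  match scores with
  | [] => ([], [])
  | _ :: _ =>
    let primary_list := drPrimaryB breakdowns scores
    (primary_list, drRelatedB primary_list ((PySem.Dict.mk data).getD "domains" []))

-- ===== PRECONDITION & SPEC =====
-- Pre_ excludes exactly the inputs where Python A raises: nonempty scores with no "domains" key in data (KeyError).
def Pre_determine_primary_related (scores : List (String × Int)) (breakdowns : List (String × List (String × Int))) (data : List (String × List (String × List (String × List String)))) : Prop :=
  scores ≠ [] → "domains" ∈ data.map Prod.fst
instance (scores : List (String × Int)) (breakdowns : List (String × List (String × Int))) (data : List (String × List (String × List (String × List String)))) : Decidable (Pre_determine_primary_related scores breakdowns data) := by unfold Pre_determine_primary_related; infer_instance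

def pvWitness_determine_primary_related : (List (String × Int)) × (List (String × List (String × Int))) × (List (String × List (String × List (String × List String)))) :=
  ([("a", 1)], [], [("domains", [("a", [("cross_domains", ["b"])])])])

def Spec_determine_primary_related (scores : List (String × Int)) (breakdowns : List (String × List (String × Int))) (data : List (String × List (String × List (String × List String)))) (out : List String × List String) : Prop := out = determine_primary_related_alt scores breakdowns data
instance (scores : List (String × Int)) (breakdowns : List (String × List (String × Int))) (data : List (String × List (String × List (String × List String)))) (out : List String × List String) : Decidable (Spec_determine_primary_related scores breakdowns data out) := by unfold Spec_determine_primary_related; infer_instance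

-- ===== CLAIM (what is proved, stated in full; the proofs are below) =====
def Claim_equal_determine_primary_related : Prop := ∀ (scores : List (String × Int)) (breakdowns : List (String × List (String × Int))) (data : List (String × List (String × List (String × List String)))), Dom_determine_primary_related scores breakdowns data → Pre_determine_primary_related scores breakdowns data → Spec_determine_primary_related scores breakdowns data (determine_primary_related scores breakdowns data)

-- ===== LEMMAS AND PROOFS =====

-- lexicographic ≤ on triples, and its interplay with drLexLt
def drTrLe (a b : Int × Int × Int) : Prop :=
  a.1 < b.1 ∨ (a.1 = b.1 ∧ (a.2.1 < b.2.1 ∨ (a.2.1 = b.2.1 ∧ a.2.2 ≤ b.2.2)))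

theorem drTrLe_refl (a : Int × Int × Int) : drTrLe a a := by
  unfold drTrLe; omega

theorem drTrLe_trans {a b c : Int × Int × Int} (h1 : drTrLe a b) (h2 : drTrLe b c) : drTrLe a c := by
  unfold drTrLe at *; omega

theorem drLexLt_cases (a b : Int × Int × Int) : drLexLt a b = true ∨ drTrLe b a := by
  unfold drLexLt drTrLe
  simp only [Bool.or_eq_true, Bool.and_eq_true, decide_eq_true_eq, beq_iff_eq]
  omega

theorem drLexLt_le {a b : Int × Int × Int} (h : drLexLt a b = true) : drTrLe a b := by
  unfold drLexLt at h; unfold drTrLe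
  simp only [Bool.or_eq_true, Bool.and_eq_true, decide_eq_true_eq, beq_iff_eq] at h
  omega

theorem drTrLe_fst {a b : Int × Int × Int} (h : drTrLe a b) : a.1 ≤ b.1 := by
  unfold drTrLe at h; omega

theorem drTrLe_snd {a b : Int × Int × Int} (h : drTrLe a b) (h1 : a.1 = b.1) : a.2.1 ≤ b.2.1 := by
  unfold drTrLe at h; omega

theorem drTrLe_thd {a b : Int × Int × Int} (h : drTrLe a b) (h1 : a.1 = b.1) (h2 : a.2.1 = b.2.1) : a.2.2 ≤ b.2.2 := by
  unfold drTrLe at h; omega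

-- the running-max fold attains its value and bounds every key
theorem drFoldBest {α : Type} (K : α → Int × Int × Int) (l : List α) (b : Int × Int × Int) :
    (l.foldl (fun b q => if drLexLt b (K q) then K q else b) b = b ∨
      ∃ q ∈ l, l.foldl (fun b q => if drLexLt b (K q) then K q else b) b = K q) ∧
    drTrLe b (l.foldl (fun b q => if drLexLt b (K q) then K q else b) b) ∧
    (∀ q ∈ l, drTrLe (K q) (l.foldl (fun b q => if drLexLt b (K q) then K q else b) b)) := by
  induction l generalizing b with
  | nil => exact ⟨Or.inl rfl, drTrLe_refl b, by simp⟩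
  | cons x xs ih =>
    simp only [List.foldl_cons]
    by_cases h : drLexLt b (K x) = true
    · rw [if_pos h]
      obtain ⟨hmem, hle, hub⟩ := ih (K x)
      refine ⟨?_, drTrLe_trans (drLexLt_le h) hle, ?_⟩
      · rcases hmem with h' | ⟨q, hq, h'⟩
        · exact Or.inr ⟨x, List.mem_cons_self, h'⟩
        · exact Or.inr ⟨q, List.mem_cons_of_mem _ hq, h'⟩
      · intro q hq
        rcases List.mem_cons.mp hq with rfl | hq'
        · exact hle
        · exact hub q hq'
    · rw [if_neg h]
      obtain ⟨hmem, hle, hub⟩ := ih b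
      refine ⟨?_, hle, ?_⟩
      · rcases hmem with h' | ⟨q, hq, h'⟩
        · exact Or.inl h'
        · exact Or.inr ⟨q, List.mem_cons_of_mem _ hq, h'⟩
      · intro q hq
        rcases List.mem_cons.mp hq with rfl | hq'
        · rcases drLexLt_cases b (K q) with h' | h'
          · exact absurd h' h
          · exact drTrLe_trans h' hle
        · exact hub q hq'

theorem drFilterMapFst {α β : Type} (l : List (α × β)) (p : α → Bool) :
    (l.map Prod.fst).filter p = (l.filter (fun q => p q.1)).map Prod.fst := by
  induction l with
  | nil => rfl
  | cons x xs ih =>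
    simp only [List.map_cons, List.filter_cons]
    by_cases h : p x.1
    · simp [h, ih]
    · simp [h, ih]

theorem drMax?_some {l : List Int} (h : l ≠ []) :
    ∃ m, PySem.List.max? l (fun x => x) = some m := by
  cases hm : PySem.List.max? l (fun x => x) with
  | none => exact absurd ((PySem.List.max?_eq_none_iff _ _).mp hm) h
  | some m => exact ⟨m, rfl⟩

theorem drPrimary_eq (bk : List (String × List (String × Int))) (p0 : String × Int) (rest : List (String × Int)) :
    drPrimaryA bk (p0 :: rest) = drPrimaryB bk (p0 :: rest) := by
  set L := p0 :: rest with hL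
  set K := drKey bk with hKdef
  set kw := drKwHits bk with hkw
  set gq := drGqaHits bk with hgq
  have hKval : ∀ p : String × Int, K p = (p.2, kw p.1, gq p.1) := fun _ => rfl
  set best := rest.foldl (fun b q => if drLexLt b (K q) then K q else b) (K p0) with hbest
  -- properties of best
  have hfold := drFoldBest K rest (K p0)
  have hattain : ∃ p ∈ L, best = K p := by
    rcases hfold.1 with h | ⟨q, hq, h⟩
    · exact ⟨p0, List.mem_cons_self, h⟩
    · exact ⟨q, List.mem_cons_of_mem _ hq, h⟩
  have hub : ∀ p ∈ L, drTrLe (K p) best := by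
    intro p hp
    rcases List.mem_cons.mp hp with rfl | hp'
    · exact hfold.2.1
    · exact hfold.2.2 p hp'
  obtain ⟨pb, hpbL, hpbK⟩ := hattain
  -- m1 = max score
  obtain ⟨m1, hm1⟩ := drMax?_some (l := L.map Prod.snd) (by simp [hL])
  have hm1mem : m1 ∈ L.map Prod.snd := PySem.List.max?_mem hm1
  have hm1ub : ∀ y ∈ L.map Prod.snd, y ≤ m1 := by
    intro y hy; simpa using PySem.List.max?_isMax hm1 y hy
  have hb1 : best.1 = m1 := by
    obtain ⟨q, hqL, hq2⟩ := List.mem_map.mp hm1mem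
    have h1 : best.1 ≤ m1 := by
      have : pb.2 ∈ L.map Prod.snd := List.mem_map.mpr ⟨pb, hpbL, rfl⟩
      have := hm1ub _ this
      rw [hpbK, hKval]; exact this
    have h2 : m1 ≤ best.1 := by
      have := drTrLe_fst (hub q hqL)
      rw [hKval] at this; omega
    omega
  -- candidates
  set C := (L.filter (fun p => p.2 == m1)).map Prod.fst with hC
  have hpbC : pb.1 ∈ C := by
    refine List.mem_map.mpr ⟨pb, List.mem_filter.mpr ⟨hpbL, ?_⟩, rfl⟩
    have : best.1 = pb.2 := by rw [hpbK, hKval]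
    simp [beq_iff_eq]; omega
  have hCmem : ∀ d ∈ C, ∃ q ∈ L, q.1 = d ∧ q.2 = m1 := by
    intro d hd
    obtain ⟨q, hqf, hq1⟩ := List.mem_map.mp hd
    obtain ⟨hqL, hq2⟩ := List.mem_filter.mp hqf
    exact ⟨q, hqL, hq1, by simpa [beq_iff_eq] using hq2⟩
  -- m2 = max kw over candidates
  obtain ⟨m2, hm2⟩ := drMax?_some (l := C.map kw) (by
    simp only [ne_eq, List.map_eq_nil_iff]
    exact fun h => by rw [h] at hpbC; exact absurd hpbC (List.not_mem_nil))
  have hm2mem : m2 ∈ C.map kw := PySem.List.max?_mem hm2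
  have hm2ub : ∀ y ∈ C.map kw, y ≤ m2 := by
    intro y hy; simpa using PySem.List.max?_isMax hm2 y hy
  have hb2 : best.2.1 = m2 := by
    obtain ⟨d, hdC, hdkw⟩ := List.mem_map.mp hm2mem
    obtain ⟨q, hqL, hq1, hq2⟩ := hCmem d hdC
    have h1 : best.2.1 ≤ m2 := by
      have : kw pb.1 ∈ C.map kw := List.mem_map.mpr ⟨pb.1, hpbC, rfl⟩
      have := hm2ub _ this
      rw [hpbK, hKval]; exact this
    have h2 : m2 ≤ best.2.1 := by
      have hle := hub q hqL
      rw [hKval] at hle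
      have := drTrLe_snd hle (by simp; omega)
      simp at this; rw [← hdkw, ← hq1]; exact this
    omega
  -- kw winners
  set W := C.filter (fun d => kw d == m2) with hW
  have hpbW : pb.1 ∈ W := by
    refine List.mem_filter.mpr ⟨hpbC, ?_⟩
    have : best.2.1 = kw pb.1 := by rw [hpbK, hKval]
    simp [beq_iff_eq]; omega
  have hWmem : ∀ d ∈ W, ∃ q ∈ L, q.1 = d ∧ q.2 = m1 ∧ kw d = m2 := by
    intro d hd
    obtain ⟨hdC, hdkw⟩ := List.mem_filter.mp hd
    obtain ⟨q, hqL, hq1, hq2⟩ := hCmem d hdC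
    exact ⟨q, hqL, hq1, hq2, by simpa [beq_iff_eq] using hdkw⟩
  -- m3 = max gqa over kw winners
  obtain ⟨m3, hm3⟩ := drMax?_some (l := W.map gq) (by
    simp only [ne_eq, List.map_eq_nil_iff]
    exact fun h => by rw [h] at hpbW; exact absurd hpbW (List.not_mem_nil))
  have hm3mem : m3 ∈ W.map gq := PySem.List.max?_mem hm3
  have hm3ub : ∀ y ∈ W.map gq, y ≤ m3 := by
    intro y hy; simpa using PySem.List.max?_isMax hm3 y hy
  have hb3 : best.2.2 = m3 := by
    obtain ⟨d, hdW, hdgq⟩ := List.mem_map.mp hm3mem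
    obtain ⟨q, hqL, hq1, hq2, hqkw⟩ := hWmem d hdW
    have h1 : best.2.2 ≤ m3 := by
      have : gq pb.1 ∈ W.map gq := List.mem_map.mpr ⟨pb.1, hpbW, rfl⟩
      have := hm3ub _ this
      rw [hpbK, hKval]; exact this
    have h2 : m3 ≤ best.2.2 := by
      have hle := hub q hqL
      rw [hKval] at hle
      have := drTrLe_thd hle (by simp; omega) (by simp; rw [hq1, hqkw]; omega)
      simp at this; rw [← hdgq, ← hq1]; exact this
    omega
  -- best as a literal triple
  have hbestval : best = (m1, m2, m3) := by
    obtain ⟨b1, b2, b3⟩ := best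
    simp only [Prod.mk.injEq]
    exact ⟨hb1, hb2, hb3⟩
  -- B's filter equals the staged triple filter
  have hfilter : L.filter (fun p => K p == best) =
      ((L.filter (fun p => p.2 == m1)).filter (fun q => kw q.1 == m2)).filter (fun q => gq q.1 == m3) := by
    rw [List.filter_filter, List.filter_filter]
    apply List.filter_congr
    intro x _
    rw [Bool.eq_iff_iff]
    simp only [beq_iff_eq, Bool.and_eq_true, hKval, hbestval, Prod.ext_iff]
    tauto
  set G := W.filter (fun d => gq d == m3) with hG
  have hBeq : drPrimaryB bk (p0 :: rest) = G := by
    have h1 : G = (((L.filter (fun p => p.2 == m1)).filter (fun q => kw q.1 == m2)).filter (fun q => gq q.1 == m3)).map Prod.fst := by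
      rw [hG, hW, hC, drFilterMapFst, drFilterMapFst]
    simp only [drPrimaryB]
    rw [← hKdef, ← hbest, ← hL, hfilter, h1]
  have hG1 : C.length = 1 → C = G := by
    intro h
    obtain ⟨d, hCd⟩ := List.length_eq_one_iff.mp h
    have hm2d : m2 = kw d := by
      have := hm2mem; rw [hCd] at this; simpa using this
    have hWd : W = [d] := by
      rw [hW, hCd]; simp [hm2d]
    have hm3d : m3 = gq d := by
      have := hm3mem; rw [hWd] at this; simpa using this
    rw [hG, hWd, hCd]; simp [hm3d]
  have hG2 : W.length = 1 → W = G := by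
    intro h
    obtain ⟨d, hWd⟩ := List.length_eq_one_iff.mp h
    have hm3d : m3 = gq d := by
      have := hm3mem; rw [hWd] at this; simpa using this
    rw [hG, hWd]; simp [hm3d]
  -- A's staged computation, branch by branch
  have hA : drPrimaryA bk (p0 :: rest) = G := by
    unfold drPrimaryA
    rw [← hL, hm1]
    simp only [Option.getD_some]
    rw [← hC, hm2]
    simp only [Option.getD_some]
    rw [← hkw, ← hW, hm3]
    simp only [Option.getD_some]
    rw [← hgq, ← hG]
    by_cases h1 : C.length = 1
    · rw [if_pos (by simp [h1])]
      exact hG1 h1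
    · rw [if_neg (by simpa using h1)]
      by_cases h2 : W.length = 1
      · rw [if_pos (by simp [h2])]
        exact hG2 h2
      · rw [if_neg (by simpa using h2)]
  rw [hA, hBeq]

-- membership and Nodup through A's conditional-add folds
theorem drInnerMem (pset : PySem.Set String) (l : List String) (s : PySem.Set String) (y : String) :
    y ∈ l.foldl (fun s r => if PySem.Set.contains pset r then s else PySem.Set.add s r) s ↔
      y ∈ s ∨ (y ∈ l ∧ PySem.Set.contains pset y = false) := by
  induction l generalizing s with
  | nil => simp
  | cons x xs ih =>
    simp only [List.foldl_cons]
    by_cases hx : PySem.Set.contains pset x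
    · rw [if_pos hx, ih]
      constructor
      · rintro (h | ⟨h1, h2⟩)
        · exact Or.inl h
        · exact Or.inr ⟨List.mem_cons_of_mem _ h1, h2⟩
      · rintro (h | ⟨h1, h2⟩)
        · exact Or.inl h
        · rcases List.mem_cons.mp h1 with rfl | h1'
          · rw [hx] at h2; cases h2
          · exact Or.inr ⟨h1', h2⟩
    · rw [if_neg hx, ih]
      simp only [PySem.Set.mem_add, List.mem_cons]
      constructor
      · rintro ((h | rfl) | ⟨h1, h2⟩)
        · exact Or.inl h
        · exact Or.inr ⟨Or.inl rfl, Bool.not_eq_true _ ▸ (by simpa using hx)⟩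
        · exact Or.inr ⟨Or.inr h1, h2⟩
      · rintro (h | ⟨h1 | h1, h2⟩)
        · exact Or.inl (Or.inl h)
        · exact Or.inl (Or.inr h1)
        · exact Or.inr ⟨h1, h2⟩

theorem drInnerNodup (pset : PySem.Set String) (l : List String) (s : PySem.Set String) (hs : s.Nodup) :
    (l.foldl (fun s r => if PySem.Set.contains pset r then s else PySem.Set.add s r) s).Nodup := by
  induction l generalizing s with
  | nil => exact hs
  | cons x xs ih =>
    simp only [List.foldl_cons]
    by_cases hx : PySem.Set.contains pset x
    · rw [if_pos hx]; exact ih s hs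
    · rw [if_neg hx]; exact ih _ (PySem.Set.nodup_add _ _ hs)

theorem drOuterMem (pset : PySem.Set String) (doms : List (String × List (String × List String)))
    (pl : List String) (s : PySem.Set String) (y : String) :
    y ∈ pl.foldl (fun s pid =>
        (drRefs doms pid).foldl (fun s r => if PySem.Set.contains pset r then s else PySem.Set.add s r) s) s ↔
      y ∈ s ∨ ∃ pid ∈ pl, y ∈ drRefs doms pid ∧ PySem.Set.contains pset y = false := by
  induction pl generalizing s with
  | nil => simp
  | cons x xs ih =>
    simp only [List.foldl_cons]
    rw [ih, drInnerMem]
    constructor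
    · rintro ((h | ⟨h1, h2⟩) | ⟨pid, hp, h1, h2⟩)
      · exact Or.inl h
      · exact Or.inr ⟨x, List.mem_cons_self, h1, h2⟩
      · exact Or.inr ⟨pid, List.mem_cons_of_mem _ hp, h1, h2⟩
    · rintro (h | ⟨pid, hp, h1, h2⟩)
      · exact Or.inl (Or.inl h)
      · rcases List.mem_cons.mp hp with rfl | hp'
        · exact Or.inl (Or.inr ⟨h1, h2⟩)
        · exact Or.inr ⟨pid, hp', h1, h2⟩

theorem drOuterNodup (pset : PySem.Set String) (doms : List (String × List (String × List String)))
    (pl : List String) (s : PySem.Set String) (hs : s.Nodup) :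
    (pl.foldl (fun s pid =>
        (drRefs doms pid).foldl (fun s r => if PySem.Set.contains pset r then s else PySem.Set.add s r) s) s).Nodup := by
  induction pl generalizing s with
  | nil => exact hs
  | cons x xs ih =>
    simp only [List.foldl_cons]
    exact ih _ (drInnerNodup pset _ s hs)

theorem drSecondMem (pset : PySem.Set String) (doms : List (String × List (String × List String)))
    (s : PySem.Set String) (y : String) :
    y ∈ doms.foldl (fun s q =>
        if PySem.Set.contains pset q.1 then s
        else if ((PySem.Dict.mk q.2).getD "cross_domains" []).any (fun r => PySem.Set.contains pset r)
          then PySem.Set.add s q.1 else s) s ↔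
      y ∈ s ∨ ∃ q ∈ doms, PySem.Set.contains pset q.1 = false ∧
        ((PySem.Dict.mk q.2).getD "cross_domains" []).any (fun r => PySem.Set.contains pset r) = true ∧ q.1 = y := by
  induction doms generalizing s with
  | nil => simp
  | cons x xs ih =>
    simp only [List.foldl_cons]
    by_cases h1 : PySem.Set.contains pset x.1
    · rw [if_pos h1, ih]
      constructor
      · rintro (h | ⟨q, hq, hc⟩)
        · exact Or.inl h
        · exact Or.inr ⟨q, List.mem_cons_of_mem _ hq, hc⟩
      · rintro (h | ⟨q, hq, hc1, hc2, hc3⟩)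
        · exact Or.inl h
        · rcases List.mem_cons.mp hq with rfl | hq'
          · rw [h1] at hc1; cases hc1
          · exact Or.inr ⟨q, hq', hc1, hc2, hc3⟩
    · rw [if_neg h1]
      by_cases h2 : ((PySem.Dict.mk x.2).getD "cross_domains" []).any (fun r => PySem.Set.contains pset r)
      · rw [if_pos h2, ih]
        simp only [PySem.Set.mem_add]
        constructor
        · rintro ((h | rfl) | ⟨q, hq, hc⟩)
          · exact Or.inl h
          · exact Or.inr ⟨x, List.mem_cons_self, by simpa using h1, h2, rfl⟩
          · exact Or.inr ⟨q, List.mem_cons_of_mem _ hq, hc⟩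
        · rintro (h | ⟨q, hq, hc1, hc2, hc3⟩)
          · exact Or.inl (Or.inl h)
          · rcases List.mem_cons.mp hq with rfl | hq'
            · exact Or.inl (Or.inr hc3.symm)
            · exact Or.inr ⟨q, hq', hc1, hc2, hc3⟩
      · rw [if_neg h2, ih]
        constructor
        · rintro (h | ⟨q, hq, hc⟩)
          · exact Or.inl h
          · exact Or.inr ⟨q, List.mem_cons_of_mem _ hq, hc⟩
        · rintro (h | ⟨q, hq, hc1, hc2, hc3⟩)
          · exact Or.inl h
          · rcases List.mem_cons.mp hq with rfl | hq'
            · exact absurd hc2 h2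
            · exact Or.inr ⟨q, hq', hc1, hc2, hc3⟩

theorem drSecondNodup (pset : PySem.Set String) (doms : List (String × List (String × List String)))
    (s : PySem.Set String) (hs : s.Nodup) :
    (doms.foldl (fun s q =>
        if PySem.Set.contains pset q.1 then s
        else if ((PySem.Dict.mk q.2).getD "cross_domains" []).any (fun r => PySem.Set.contains pset r)
          then PySem.Set.add s q.1 else s) s).Nodup := by
  induction doms generalizing s with
  | nil => exact hs
  | cons x xs ih =>
    simp only [List.foldl_cons]
    by_cases h1 : PySem.Set.contains pset x.1
    · rw [if_pos h1]; exact ih s hs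
    · rw [if_neg h1]
      by_cases h2 : ((PySem.Dict.mk x.2).getD "cross_domains" []).any (fun r => PySem.Set.contains pset r)
      · rw [if_pos h2]; exact ih _ (PySem.Set.nodup_add _ _ hs)
      · rw [if_neg h2]; exact ih s hs

theorem drRelated_eq (pl : List String) (doms : List (String × List (String × List String))) :
    drRelatedA pl doms = drRelatedB pl doms := by
  unfold drRelatedA drRelatedB
  apply (PySem.List.sorted_id_eq_sorted_id_iff_perm _ _).mpr
  apply (List.perm_ext_iff_of_nodup ?_ ?_).mpr
  · intro y
    rw [drSecondMem, drOuterMem]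
    simp only [PySem.Set.mem_ofList, List.mem_append, List.mem_flatMap, List.mem_filter,
      List.mem_map, Bool.not_eq_eq_eq_not, Bool.not_true, Bool.and_eq_true,
      List.not_mem_nil, false_or, PySem.Set.empty]
    constructor
    · rintro (⟨pid, hp, h1, h2⟩ | ⟨q, hq, hc1, hc2, hc3⟩)
      · exact Or.inl ⟨pid, hp, h1, h2⟩
      · exact Or.inr ⟨q, ⟨hq, hc1, hc2⟩, hc3⟩
    · rintro (⟨pid, hp, h1, h2⟩ | ⟨q, ⟨hq, hc1, hc2⟩, hc3⟩)
      · exact Or.inl ⟨pid, hp, h1, h2⟩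
      · exact Or.inr ⟨q, hq, hc1, hc2, hc3⟩
  · exact drSecondNodup _ _ _ (drOuterNodup _ _ _ _ List.nodup_nil)
  · exact PySem.Set.nodup_ofList _

-- ===== VERDICT (by name: the statement is the Claim_ definition above) =====
theorem determine_primary_related_spec : Claim_equal_determine_primary_related := by
  intro scores bk data _ _
  unfold Spec_determine_primary_related
  cases scores with
  | nil => rfl
  | cons p0 rest =>
    show determine_primary_related (p0 :: rest) bk data = determine_primary_related_alt (p0 :: rest) bk data
    simp only [determine_primary_related, determine_primary_related_alt]
    rw [drPrimary_eq, drRelated_eq]
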